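-- pv_equiv track=rewrite | github.com/aditya-doshatti/Leetcode | check_if_all_as_appears_before_all_bs_2124.py | checkString
-- ===== SOURCE A (Python) =====
-- def checkString(s: str) -> bool:
--     bFound = False
--     for char in s:
--         if bFound and char == 'a':
--             return False
--         elif char == 'b':
--             bFound = True
--     return True
-- ===== SOURCE B (Python) =====
-- def checkString(s: str) -> bool:
--     fb = s.find('b')
--     return fb == -1 or 'a' not in s[fb:]
-- ===== Notes on version B (the rewrite author's own statement) =====
-- stated objective: simpler
-- what changed: Replaces the per-character scan with a boolean flag by an index-first pass: find the position of the first forbidden letter and test the suffix from there for the other letter.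
import Mathlib
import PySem

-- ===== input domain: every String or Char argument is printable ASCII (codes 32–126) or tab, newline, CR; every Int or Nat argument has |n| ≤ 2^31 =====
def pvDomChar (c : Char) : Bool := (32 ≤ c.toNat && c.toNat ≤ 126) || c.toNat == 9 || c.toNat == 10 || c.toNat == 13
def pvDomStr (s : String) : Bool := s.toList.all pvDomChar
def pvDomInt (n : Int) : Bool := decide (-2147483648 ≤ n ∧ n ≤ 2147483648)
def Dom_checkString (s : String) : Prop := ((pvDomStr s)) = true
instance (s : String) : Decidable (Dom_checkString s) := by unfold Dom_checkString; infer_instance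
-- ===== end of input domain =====

-- B replaces A's flag-carrying character scan by locating the first 'b' (str.find) and checking the suffix for an 'a' (simpler decomposition).


-- ===== PORT A =====
-- literal port of A: scan with a bFound flag, early return False on 'a' after a 'b'
def checkStringGo : List Char → Bool → Bool
  | [], _ => true
  | c :: rest, bFound =>
    if bFound && c == 'a' then false
    else if c == 'b' then checkStringGo rest true
    else checkStringGo rest bFound

def checkString (s : String) : Bool := checkStringGo s.toList false

-- ===== PORT B =====
def checkString_alt (s : String) : Bool :=
  let fb := PySem.Str.find s "b"
  fb == -1 || !(PySem.Str.isIn "a" (PySem.Str.slice s (some fb) none))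

-- ===== PRECONDITION & SPEC =====
def Spec_checkString (s : String) (out : Bool) : Prop := out = checkString_alt s
instance (s : String) (out : Bool) : Decidable (Spec_checkString s out) := by unfold Spec_checkString; infer_instance

-- ===== CLAIM (what is proved, stated in full; the proofs are below) =====
def Claim_equal_checkString : Prop := ∀ (s : String), Dom_checkString s → Spec_checkString s (checkString s)

-- ===== LEMMAS AND PROOFS =====

theorem pv_singleton_infix_iff_mem (a : Char) (l : List Char) : [a] <:+: l ↔ a ∈ l := by
  constructor
  · intro h; exact List.singleton_sublist.mp h.sublist
  · intro h
    obtain ⟨s, t, rfl⟩ := List.append_of_mem h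
    exact ⟨s, t, by simp⟩

theorem pv_isIn_singleton (a : Char) (l : List Char) :
    PySem.Chars.isIn [a] l = decide (a ∈ l) := by
  by_cases h : a ∈ l
  · simp [h, PySem.Chars.isIn_iff_infix, pv_singleton_infix_iff_mem]
  · simp [h, PySem.Chars.isIn_eq_false_iff, pv_singleton_infix_iff_mem]

theorem pv_find_eq_of (cs sub : List Char) (k : ℕ) (h1 : sub <+: cs.drop k)
    (h2 : ∀ i < k, ¬ sub <+: cs.drop i) : PySem.Chars.find cs sub = (k : Int) := by
  have hnn : 0 ≤ PySem.Chars.find cs sub := by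
    rw [PySem.Chars.find_nonneg_iff]
    exact (h1.isInfix).trans (List.drop_suffix k cs).isInfix
  obtain ⟨hpre, hmin⟩ := PySem.Chars.find_spec hnn
  have hk : (PySem.Chars.find cs sub).toNat = k := by
    rcases Nat.lt_trichotomy (PySem.Chars.find cs sub).toNat k with h | h | h
    · exact absurd hpre (h2 _ h)
    · exact h
    · exact absurd h1 (hmin k h)
  omega

-- A with the flag already set just checks that no 'a' remains
theorem pv_goA_true (cs : List Char) : checkStringGo cs true = !decide ('a' ∈ cs) := by
  induction cs with
  | nil => simp [checkStringGo]
  | cons c rest ih =>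
    by_cases hc : c = 'a'
    · subst hc; simp [checkStringGo]
    · by_cases hb : c = 'b' <;> simp [checkStringGo, hc, hb, ih, Ne.symm hc]

def checkStringAltList (cs : List Char) : Bool :=
  let fb := PySem.Chars.find cs ['b']
  fb == -1 || !(PySem.Chars.isIn ['a'] (PySem.List.slice cs (some fb) none))

theorem pv_main (cs : List Char) : checkStringGo cs false = checkStringAltList cs := by
  induction cs with
  | nil => decide
  | cons c rest ih =>
    by_cases hb : c = 'b'
    · subst hb
      have hf : PySem.Chars.find ('b' :: rest) ['b'] = (0 : Int) := by
        apply pv_find_eq_of _ _ 0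
        · simp
        · intro i hi; omega
      simp [checkStringGo, checkStringAltList, hf, pv_goA_true, pv_isIn_singleton]
    · by_cases hmem : 'b' ∈ rest
      · -- 'b' occurs in rest at the first occurrence k; find on cons is k+1
        have hnn : 0 ≤ PySem.Chars.find rest ['b'] := by
          rw [PySem.Chars.find_nonneg_iff, pv_singleton_infix_iff_mem]; exact hmem
        set k : ℕ := (PySem.Chars.find rest ['b']).toNat with hkdef
        obtain ⟨hpre, hmin⟩ := PySem.Chars.find_spec hnn
        have hfr : PySem.Chars.find rest ['b'] = (k : Int) := by omega
        have hfc : PySem.Chars.find (c :: rest) ['b'] = ((k + 1 : ℕ) : Int) := by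
          apply pv_find_eq_of
          · simpa using hpre
          · intro i hi
            match i with
            | 0 =>
              intro hcon
              rcases hcon with ⟨t, ht⟩
              simp only [List.cons_append, List.nil_append] at ht
              exact hb (List.cons.inj ht).1.symm
            | i + 1 =>
              simpa using hmin i (by omega)
        simp only [checkStringGo, checkStringAltList, hfc, hfr, ih]
        rw [PySem.List.slice_from_natCast, PySem.List.slice_from_natCast]
        have e2 : ((((k + 1 : ℕ)) : Int) == -1) = false := by simp; omega
        rw [e2]
        simp [hb, List.drop_succ_cons]
      · -- no 'b' anywhere: both find results are -1
        have h1 : PySem.Chars.find rest ['b'] = -1 := by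
          rw [PySem.Chars.find_eq_neg_one_iff, pv_singleton_infix_iff_mem]; exact hmem
        have h2 : PySem.Chars.find (c :: rest) ['b'] = -1 := by
          rw [PySem.Chars.find_eq_neg_one_iff, pv_singleton_infix_iff_mem]
          simp [Ne.symm hb, hmem]
        simp [checkStringGo, checkStringAltList, h1, h2, hb, ih]

-- ===== VERDICT (by name: the statement is the Claim_ definition above) =====
theorem checkString_spec : Claim_equal_checkString := by
  intro s _
  show checkString s = checkString_alt s
  have : checkString_alt s = checkStringAltList s.toList := by
    simp [checkString_alt, checkStringAltList]
  rw [this, checkString, pv_main]
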